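-- pv_equiv track=rewrite | github.com/nielifang/aa | vessel/methods.py | layer_con_list_to_db
-- ===== SOURCE A (Python) =====
-- def layer_con_list_to_db(con_list):
--     list_len = len(con_list)
--     if list_len % 2 == 0:
--         lay_str = ''
--         count = 0
--         for i in con_list:
--             count += 1
--             if count == int(list_len / 2)+1:
--                 lay_str += '#'
--             lay_str += i
--         return lay_str
--     else:
--         lay_str = ''
--         count = 0
--         for j in con_list:
--             count += 1
--             if count == int(list_len / 2)+1:
--                 if j == '1':
--                     lay_str += '*'
--                 else:
--                     lay_str += '#'
--                 continue
--             lay_str += j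
--         return lay_str
-- ===== SOURCE B (Python) =====
-- def layer_con_list_to_db(con_list):
--     if not con_list:
--         return ''
--     mid = len(con_list) // 2
--     if len(con_list) % 2 == 0:
--         return ''.join(con_list[:mid]) + '#' + ''.join(con_list[mid:])
--     return (''.join(con_list[:mid])
--             + ('*' if con_list[mid] == '1' else '#')
--             + ''.join(con_list[mid+1:]))
-- ===== Notes on version B (the rewrite author's own statement) =====
-- stated objective: simpler
-- what changed: Replaces the counting loop with an arithmetic midpoint split: slice the list at len//2 and join the halves around the marker (empty list returns '' directly, as A's loop never runs).
import Mathlib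
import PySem

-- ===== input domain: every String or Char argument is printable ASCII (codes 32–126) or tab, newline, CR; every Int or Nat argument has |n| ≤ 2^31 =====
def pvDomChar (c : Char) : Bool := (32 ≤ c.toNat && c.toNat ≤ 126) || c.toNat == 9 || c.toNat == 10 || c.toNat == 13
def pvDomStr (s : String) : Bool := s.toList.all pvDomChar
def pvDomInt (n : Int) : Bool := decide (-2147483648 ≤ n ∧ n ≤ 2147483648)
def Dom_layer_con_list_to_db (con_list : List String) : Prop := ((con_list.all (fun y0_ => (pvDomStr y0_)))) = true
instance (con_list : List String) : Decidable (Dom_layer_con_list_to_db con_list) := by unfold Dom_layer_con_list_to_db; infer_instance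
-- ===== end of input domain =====

-- B replaces A's counting loop by an arithmetic midpoint split (slice at len//2, join around the marker): simpler decomposition, same cost.


-- ===== PORT A =====
-- counters and length are Python ints that stay non-negative; ported as Nat
def layer_con_list_to_db (con_list : List String) : String :=
  let list_len := con_list.length
  if list_len % 2 = 0 then
    (con_list.foldl (fun (st : String × Nat) i =>
      let count := st.2 + 1
      if count = list_len / 2 + 1 then (st.1 ++ "#" ++ i, count)
      else (st.1 ++ i, count)) ("", 0)).1
  else
    (con_list.foldl (fun (st : String × Nat) j =>
      let count := st.2 + 1
      if count = list_len / 2 + 1 then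
        (st.1 ++ (if j = "1" then "*" else "#"), count)    -- 'continue': j itself is not appended
      else (st.1 ++ j, count)) ("", 0)).1

-- ===== PORT B =====
def layer_con_list_to_db_alt (con_list : List String) : String :=
  if con_list = [] then "" else
  let mid := con_list.length / 2
  if con_list.length % 2 = 0 then
    String.join (con_list.take mid) ++ "#" ++ String.join (con_list.drop mid)
  else
    String.join (con_list.take mid)
      ++ (if con_list.getD mid "" = "1" then "*" else "#")
      ++ String.join (con_list.drop (mid + 1))

-- ===== PRECONDITION & SPEC =====
def Spec_layer_con_list_to_db (con_list : List String) (out : String) : Prop := out = layer_con_list_to_db_alt con_list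
instance (con_list : List String) (out : String) : Decidable (Spec_layer_con_list_to_db con_list out) := by unfold Spec_layer_con_list_to_db; infer_instance

-- ===== CLAIM (what is proved, stated in full; the proofs are below) =====
def Claim_equal_layer_con_list_to_db : Prop := ∀ (con_list : List String), Dom_layer_con_list_to_db con_list → Spec_layer_con_list_to_db con_list (layer_con_list_to_db con_list)

-- ===== LEMMAS AND PROOFS =====

theorem strfoldl_shift (l : List String) (a : String) :
    l.foldl (fun r s => r ++ s) a = a ++ l.foldl (fun r s => r ++ s) "" := by
  induction l generalizing a with
  | nil => simp
  | cons i rest ih =>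
    simp only [List.foldl]
    rw [ih (a ++ i), ih ("" ++ i)]
    simp [String.append_assoc]

theorem join_nil : String.join ([] : List String) = "" := rfl

theorem join_cons (i : String) (rest : List String) :
    String.join (i :: rest) = i ++ String.join rest := by
  simp only [String.join, List.foldl]
  rw [strfoldl_shift]
  simp

-- the string emitted by A's even-length loop with target count t, starting at counter c
def emitEven (t c : Nat) (l : List String) : String :=
  match l with
  | [] => ""
  | i :: rest => (if c + 1 = t then ("#" : String) else "") ++ i ++ emitEven t (c + 1) rest

-- the string emitted by A's odd-length loop
def emitOdd (t c : Nat) (l : List String) : String :=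
  match l with
  | [] => ""
  | j :: rest => (if c + 1 = t then (if j = "1" then ("*" : String) else "#") else j) ++ emitOdd t (c + 1) rest

theorem foldEven_eq (t : Nat) (l : List String) (s : String) (c : Nat) :
    (l.foldl (fun (st : String × Nat) i =>
      if st.2 + 1 = t then (st.1 ++ "#" ++ i, st.2 + 1) else (st.1 ++ i, st.2 + 1)) (s, c)).1
    = s ++ emitEven t c l := by
  induction l generalizing s c with
  | nil => simp [emitEven]
  | cons i rest ih =>
    simp only [List.foldl, emitEven]
    split <;> rw [ih] <;> simp [String.append_assoc]

theorem foldOdd_eq (t : Nat) (l : List String) (s : String) (c : Nat) :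
    (l.foldl (fun (st : String × Nat) j =>
      if st.2 + 1 = t then (st.1 ++ (if j = "1" then "*" else "#"), st.2 + 1)
      else (st.1 ++ j, st.2 + 1)) (s, c)).1
    = s ++ emitOdd t c l := by
  induction l generalizing s c with
  | nil => simp [emitOdd]
  | cons j rest ih =>
    simp only [List.foldl, emitOdd]
    split <;> rw [ih] <;> simp [String.append_assoc]

theorem emitEven_past (t c : Nat) (h : t ≤ c) (l : List String) :
    emitEven t c l = String.join l := by
  induction l generalizing c with
  | nil => simp [emitEven, String.join]
  | cons i rest ih =>
    have : ¬ (c + 1 = t) := by omega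
    simp [emitEven, this, ih (c + 1) (by omega), join_cons]

theorem emitOdd_past (t c : Nat) (h : t ≤ c) (l : List String) :
    emitOdd t c l = String.join l := by
  induction l generalizing c with
  | nil => simp [emitOdd, String.join]
  | cons j rest ih =>
    have : ¬ (c + 1 = t) := by omega
    simp [emitOdd, this, ih (c + 1) (by omega), join_cons]

theorem emitEven_hit (l : List String) (c k : Nat) (hk : k < l.length) :
    emitEven (c + k + 1) c l
      = String.join (l.take k) ++ "#" ++ String.join (l.drop k) := by
  induction l generalizing c k with
  | nil => simp at hk
  | cons i rest ih =>
    cases k with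
    | zero =>
      simp [emitEven, emitEven_past (c + 1) (c + 1) le_rfl rest, join_cons, join_nil, String.append_assoc]
    | succ k' =>
      have hne : ¬ (c + 1 = c + (k' + 1) + 1) := by omega
      have := ih (c + 1) k' (by simpa using hk)
      simp only [emitEven, if_neg hne]
      have harg : c + 1 + k' + 1 = c + (k' + 1) + 1 := by omega
      rw [harg] at this
      rw [this]
      simp [join_cons, String.append_assoc]

theorem emitOdd_hit (l : List String) (c k : Nat) (hk : k < l.length) :
    emitOdd (c + k + 1) c l
      = String.join (l.take k) ++ (if l.getD k "" = "1" then "*" else "#")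
          ++ String.join (l.drop (k + 1)) := by
  induction l generalizing c k with
  | nil => simp at hk
  | cons j rest ih =>
    cases k with
    | zero =>
      simp [emitOdd, emitOdd_past (c + 1) (c + 1) le_rfl rest, join_nil]
    | succ k' =>
      have hne : ¬ (c + 1 = c + (k' + 1) + 1) := by omega
      have := ih (c + 1) k' (by simpa using hk)
      simp only [emitOdd, if_neg hne]
      have harg : c + 1 + k' + 1 = c + (k' + 1) + 1 := by omega
      rw [harg] at this
      rw [this]
      simp [join_cons, String.append_assoc, List.getD]

-- ===== VERDICT (by name: the statement is the Claim_ definition above) =====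
theorem layer_con_list_to_db_spec : Claim_equal_layer_con_list_to_db := by
  intro l _
  unfold Spec_layer_con_list_to_db layer_con_list_to_db layer_con_list_to_db_alt
  rcases eq_or_ne l [] with rfl | hne
  · simp
  · have hlen : 0 < l.length := List.length_pos_of_ne_nil hne
    have hmid : l.length / 2 < l.length := Nat.div_lt_of_lt_mul (by omega)
    simp only [if_neg hne]
    by_cases hpar : l.length % 2 = 0
    · simp only [hpar, foldEven_eq]
      have := emitEven_hit l 0 (l.length / 2) hmid
      simpa using this
    · simp only [hpar, foldOdd_eq]
      have := emitOdd_hit l 0 (l.length / 2) hmid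
      simpa using this
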